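-- pv_equiv track=rewrite | github.com/alexwhiskas/goit-pycore-personal-assistant | src/bot/book_manager.py | sort_dict_by_key_prefix
-- ===== SOURCE A (Python) =====
-- from collections import defaultdict
--
-- def sort_dict_by_key_prefix (dict_to_group_keys: dict, suffixes: list[str]) -> dict:
--     prefix_groups = defaultdict(dict)
--
--     for key in dict_to_group_keys:
--         for suffix in suffixes:
--             if key.endswith(suffix):
--                 prefix = key[: -len(suffix)]
--                 prefix_groups[prefix][key] = dict_to_group_keys[key]
--                 break
--
--     # flatten the grouped dicts by sorted prefix
--     sorted_result = {}
--     for prefix in sorted(prefix_groups.keys()):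
--         sorted_keys = sorted(prefix_groups[prefix])
--         for k in sorted_keys:
--             sorted_result[k] = prefix_groups[prefix][k]
--
--     return sorted_result
-- ===== SOURCE B (Python) =====
-- def sort_dict_by_key_prefix(dict_to_group_keys: dict, suffixes: list[str]) -> dict:
--     # one pass: tag each matching key with (prefix, key, value), first matching suffix wins
--     triples = []
--     for key, value in dict_to_group_keys.items():
--         for suffix in suffixes:
--             if key.endswith(suffix):
--                 triples.append((key[: -len(suffix)], key, value))
--                 break
--     triples.sort(key=lambda t: (t[0], t[1]))
--     return {key: value for _prefix, key, value in triples}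
-- ===== Notes on version B (the rewrite author's own statement) =====
-- stated objective: simpler
-- what changed: Replaces the defaultdict-of-dicts grouping followed by a sort of the prefixes and a per-group sort of the keys with a single pass that collects flat (prefix, key, value) triples and one composite sort by (prefix, key).
import Mathlib
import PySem

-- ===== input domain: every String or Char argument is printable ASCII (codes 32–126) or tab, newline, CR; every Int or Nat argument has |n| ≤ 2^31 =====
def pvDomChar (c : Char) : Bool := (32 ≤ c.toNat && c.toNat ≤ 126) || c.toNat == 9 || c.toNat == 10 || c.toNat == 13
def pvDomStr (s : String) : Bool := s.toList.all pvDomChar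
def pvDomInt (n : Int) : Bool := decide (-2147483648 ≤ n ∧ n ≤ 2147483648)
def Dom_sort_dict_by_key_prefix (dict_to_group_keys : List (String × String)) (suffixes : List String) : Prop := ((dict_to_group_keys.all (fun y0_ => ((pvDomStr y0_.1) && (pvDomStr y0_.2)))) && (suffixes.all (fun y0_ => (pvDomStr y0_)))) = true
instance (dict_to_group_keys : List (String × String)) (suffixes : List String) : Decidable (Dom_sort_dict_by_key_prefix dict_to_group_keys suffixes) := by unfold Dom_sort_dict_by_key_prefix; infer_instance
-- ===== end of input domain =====

-- B replaces A's defaultdict-of-dicts grouping plus two nested sorts by one pass collecting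
-- (prefix, key, value) triples and a single composite sort on (prefix, key); objective: simpler.

-- shared helper: the inner 'for suffix in suffixes: if key.endswith(suffix): … break' loop,
-- identical in both Pythons (returns the first suffix the key ends with)
def firstSuffix (key : String) : List String → Option String
  | [] => none
  | s :: rest => if PySem.Str.endswith key s then some s else firstSuffix key rest

-- key[: -len(suffix)]  (exact, including the empty-suffix case -0, where Python gives '')
def prefixOf (key s : String) : String :=
  String.ofList (PySem.List.slice key.toList none (some (-(PySem.Str.len s : Int))))

-- ===== PORT A =====
def sort_dict_by_key_prefix (dict_to_group_keys : List (String × String)) (suffixes : List String) : List (String × String) :=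
  let src := PySem.Dict.ofList dict_to_group_keys
  let groups : PySem.Dict String (PySem.Dict String String) :=
    (dict_to_group_keys.map Prod.fst).foldl (fun g key =>
      match firstSuffix key suffixes with
      | none => g
      | some s =>
        let pre := prefixOf key s
        g.insert pre ((g.getD pre PySem.Dict.empty).insert key (src.getD key ""))) PySem.Dict.empty
  let res : PySem.Dict String String :=
    (PySem.List.sorted groups.keys (fun x => x) false).foldl (fun r pre =>
      let inner := groups.getD pre PySem.Dict.empty
      (PySem.List.sorted inner.keys (fun x => x) false).foldl
        (fun r k => r.insert k (inner.getD k "")) r) PySem.Dict.empty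
  res.items

-- ===== PORT B =====
def sort_dict_by_key_prefix_alt (dict_to_group_keys : List (String × String)) (suffixes : List String) : List (String × String) :=
  let triples : List (String × String × String) :=
    dict_to_group_keys.foldl (fun acc kv =>
      match firstSuffix kv.1 suffixes with
      | none => acc
      | some s => acc ++ [(prefixOf kv.1 s, kv.1, kv.2)]) []
  let sortedT := PySem.List.sorted2 triples (fun t => t.1) (fun t => t.2.1) false
  (sortedT.foldl (fun r t => r.insert t.2.1 t.2.2)
    (PySem.Dict.empty : PySem.Dict String String)).items

-- ===== PRECONDITION & SPEC =====
-- Pre_ excludes association lists with duplicate keys: the Python parameter is a dict, so such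
-- lists correspond to no actual Python input (the dict constructor already collapses duplicates).
def Pre_sort_dict_by_key_prefix (dict_to_group_keys : List (String × String)) (suffixes : List String) : Prop :=
  (dict_to_group_keys.map Prod.fst).Nodup
instance (dict_to_group_keys : List (String × String)) (suffixes : List String) : Decidable (Pre_sort_dict_by_key_prefix dict_to_group_keys suffixes) := by unfold Pre_sort_dict_by_key_prefix; infer_instance

def pvWitness_sort_dict_by_key_prefix : (List (String × String)) × List String :=
  ([("ax", "1"), ("b", "2"), ("cx", "3")], ["x", ""])

def Spec_sort_dict_by_key_prefix (dict_to_group_keys : List (String × String)) (suffixes : List String) (out : List (String × String)) : Prop := out = sort_dict_by_key_prefix_alt dict_to_group_keys suffixes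
instance (dict_to_group_keys : List (String × String)) (suffixes : List String) (out : List (String × String)) : Decidable (Spec_sort_dict_by_key_prefix dict_to_group_keys suffixes out) := by unfold Spec_sort_dict_by_key_prefix; infer_instance

-- ===== CLAIM (what is proved, stated in full; the proofs are below) =====
def Claim_equal_sort_dict_by_key_prefix : Prop := ∀ (dict_to_group_keys : List (String × String)) (suffixes : List String), Dom_sort_dict_by_key_prefix dict_to_group_keys suffixes → Pre_sort_dict_by_key_prefix dict_to_group_keys suffixes → Spec_sort_dict_by_key_prefix dict_to_group_keys suffixes (sort_dict_by_key_prefix dict_to_group_keys suffixes)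

-- ===== LEMMAS AND PROOFS =====

-- the matched (prefix, key, value) triples, in input order
def trips (d : List (String × String)) (suffixes : List String) : List (String × String × String) :=
  d.filterMap (fun kv => (firstSuffix kv.1 suffixes).map (fun s => (prefixOf kv.1 s, kv.1, kv.2)))
-- B's collection loop is trips
theorem foldl_trips (suffixes : List String) :
    ∀ (d : List (String × String)) (acc : List (String × String × String)),
    d.foldl (fun acc kv =>
      match firstSuffix kv.1 suffixes with
      | none => acc
      | some s => acc ++ [(prefixOf kv.1 s, kv.1, kv.2)]) acc = acc ++ trips d suffixes := by
  intro d
  induction d with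
  | nil => intro acc; simp [trips]
  | cons kv rest ih =>
    intro acc
    simp only [List.foldl_cons, trips, List.filterMap_cons]
    cases h : firstSuffix kv.1 suffixes with
    | none => simpa [trips] using ih acc
    | some s => simpa [trips] using ih (acc ++ [(prefixOf kv.1 s, kv.1, kv.2)])

-- sorted2 with string keys is sorted by the lexicographic pair key
theorem sorted2_eq_sorted_lex {α : Type} (xs : List α) (k1 k2 : α → String) :
    PySem.List.sorted2 xs k1 k2 false
      = PySem.List.sorted xs (fun a => toLex (k1 a, k2 a)) false := by
  show xs.foldl (fun acc x => PySem.List.insertBy _ x acc) [] = xs.foldl (fun acc x => PySem.List.insertBy _ x acc) []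
  have hb : (fun (a b : α) => decide (k1 a < k1 b) || (!decide (k1 b < k1 a) && decide (k2 a < k2 b)))
      = fun a b => decide (toLex (k1 a, k2 a) < toLex (k1 b, k2 b)) := by
    funext a b
    rcases lt_trichotomy (k1 a) (k1 b) with h | h | h
    · simp [Prod.Lex.lt_iff, h]
    · simp [Prod.Lex.lt_iff, h]
    · simp [Prod.Lex.lt_iff, h, lt_asymm h, ne_of_gt h]
  rw [hb]

-- ofList of a nodup-key association list: lookup returns the paired value
theorem ofList_getD_of_nodup (d : List (String × String))
    (hnd : (d.map Prod.fst).Nodup) :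
    ∀ kv ∈ d, (PySem.Dict.ofList d).getD kv.1 "" = kv.2 := by
  intro kv hmem
  have hitems : (PySem.Dict.ofList d).items = d := by
    have := PySem.Dict.items_foldl_insert_fresh d Prod.fst Prod.snd PySem.Dict.empty
      (by intro a _; exact PySem.Dict.contains_empty _) hnd
    simpa [PySem.Dict.ofList, PySem.Dict.update] using this
  have hk : (PySem.Dict.ofList d).keys.Nodup := by
    simpa [PySem.Dict.keys, hitems] using hnd
  exact PySem.Dict.getD_of_mem_items _ (by simpa [hitems] using hmem) hk ""

-- A's grouping loop over the keys, with the lookup into the fixed source dict,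
-- is the grouping fold over the matched triples
theorem groups_foldl_eq (suffixes : List String) (V : String → String) :
    ∀ (l : List (String × String)) (g : PySem.Dict String (PySem.Dict String String)),
    (∀ kv ∈ l, V kv.1 = kv.2) →
    (l.map Prod.fst).foldl (fun g key =>
      match firstSuffix key suffixes with
      | none => g
      | some s =>
        g.insert (prefixOf key s) ((g.getD (prefixOf key s) PySem.Dict.empty).insert key (V key))) g
    = (trips l suffixes).foldl
        (fun g t => g.insert t.1 ((g.getD t.1 PySem.Dict.empty).insert t.2.1 t.2.2)) g := by
  intro l
  induction l with
  | nil => intro g _; simp [trips]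
  | cons kv rest ih =>
    intro g hV
    simp only [List.map_cons, List.foldl_cons, trips, List.filterMap_cons]
    have hv : V kv.1 = kv.2 := hV kv (by simp)
    cases h : firstSuffix kv.1 suffixes with
    | none => simpa [trips] using ih g (fun p hp => hV p (by simp [hp]))
    | some s =>
      rw [hv]
      simpa [trips] using ih _ (fun p hp => hV p (by simp [hp]))

-- lookup of one prefix through the grouping fold
theorem getD_groupfold :
    ∀ (l : List (String × String × String)) (g : PySem.Dict String (PySem.Dict String String)) (p : String),
    ((l.foldl (fun g t => g.insert t.1 ((g.getD t.1 PySem.Dict.empty).insert t.2.1 t.2.2)) g).getD p PySem.Dict.empty)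
      = (l.filter (fun t => t.1 == p)).foldl (fun inner t => inner.insert t.2.1 t.2.2) (g.getD p PySem.Dict.empty) := by
  intro l
  induction l with
  | nil => intro g p; simp
  | cons t rest ih =>
    intro g p
    simp only [List.foldl_cons, List.filter_cons]
    by_cases hp : t.1 = p
    · subst hp
      simp [ih]
    · have : (t.1 == p) = false := by simpa using hp
      simp [this, ih, PySem.Dict.getD_insert, Ne.symm hp]

-- the keys of the matched triples form a sublist of the input keys
theorem trips_keys_sublist (d : List (String × String)) (suffixes : List String) :
    ((trips d suffixes).map (fun t => t.2.1)).Sublist (d.map Prod.fst) := by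
  induction d with
  | nil => simp [trips]
  | cons kv rest ih =>
    simp only [trips, List.filterMap_cons, List.map_cons]
    have ih' : ((trips rest suffixes).map (fun t => t.2.1)).Sublist (rest.map Prod.fst) := ih
    cases h : firstSuffix kv.1 suffixes with
    | none => simpa [trips] using ih'.cons kv.1
    | some s => simpa [trips] using ih'.cons₂ kv.1


-- pairwise ≤ plus distinct keys gives pairwise <
theorem pairwise_lt_of_sorted_nodup {α : Type} (zs : List α) (key : α → String)
    (hle : zs.Pairwise (fun a b => key a ≤ key b)) (hnd : (zs.map key).Nodup) :
    zs.Pairwise (fun a b => key a < key b) := by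
  have hne : zs.Pairwise (fun a b => key a ≠ key b) := by
    simpa [List.Nodup, List.pairwise_map] using hnd
  exact (hle.and hne).imp (fun h => lt_of_le_of_ne h.1 h.2)

-- sorting the keys, then pairing each key with its (unique) value,
-- is the projection of sorting the triples by key
theorem sorted_keys_pairs (Tp : List (String × String × String)) (V : String → String)
    (hnd : (Tp.map (fun t => t.2.1)).Nodup)
    (hV : ∀ t ∈ Tp, V t.2.1 = t.2.2) :
    (PySem.List.sorted (Tp.map (fun t => t.2.1)) (fun x => x) false).map (fun k => (k, V k))
      = (PySem.List.sorted Tp (fun t => t.2.1) false).map (fun t => t.2) := by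
  set zs := PySem.List.sorted Tp (fun t => t.2.1) false with hzs
  have hperm : zs.Perm Tp := PySem.List.sorted_perm _ _ _
  have hndz : (zs.map (fun t => t.2.1)).Nodup := (hnd.perm (hperm.map _).symm)
  have h1 : PySem.List.sorted (Tp.map (fun t => t.2.1)) (fun x => x) false
      = zs.map (fun t => t.2.1) := by
    apply PySem.List.sorted_eq_of_perm_of_pairwise_lt
    · exact hperm.map _
    · have := pairwise_lt_of_sorted_nodup zs (fun t => t.2.1)
        (PySem.List.sorted_pairwise Tp (fun t => t.2.1)) hndz
      simpa [List.pairwise_map] using this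
  rw [h1, List.map_map]
  apply List.map_congr_left
  intro t ht
  have : V t.2.1 = t.2.2 := hV t (hperm.mem_iff.mp ht)
  simp [this]

theorem perm_flatMap_filter :
    ∀ (ps : List String) (T : List (String × String × String)),
    ps.Nodup → (∀ t ∈ T, t.1 ∈ ps) →
    (ps.flatMap (fun p => T.filter (fun t => t.1 == p))).Perm T := by
  intro ps
  induction ps with
  | nil =>
    intro T _ hcov
    have : T = [] := by
      cases T with
      | nil => rfl
      | cons t r => exact absurd (hcov t (by simp)) (by simp)
    simp [this]
  | cons p rest ih =>
    intro T hnd hcov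
    simp only [List.flatMap_cons]
    have hrest : ∀ q ∈ rest, T.filter (fun t => t.1 == q)
        = (T.filter (fun t => !(t.1 == p))).filter (fun t => t.1 == q) := by
      intro q hq
      rw [List.filter_filter]
      apply List.filter_congr
      intro t _
      by_cases h : t.1 = q
      · have hpnot : p ∉ rest := (List.nodup_cons.mp hnd).1
        have hqp : q ≠ p := fun e => hpnot (e ▸ hq)
        simp [h, hqp]
      · simp [h]
    have hflat : rest.flatMap (fun q => T.filter (fun t => t.1 == q))
        = rest.flatMap (fun q => (T.filter (fun t => !(t.1 == p))).filter (fun t => t.1 == q)) := by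
      apply List.flatMap_congr  -- may not exist; fallback below
      intro q hq
      exact hrest q hq
    rw [hflat]
    have hcov' : ∀ t ∈ T.filter (fun t => !(t.1 == p)), t.1 ∈ rest := by
      intro t ht
      rcases List.mem_filter.mp ht with ⟨htT, hne⟩
      have := hcov t htT
      simp at hne
      simpa [hne] using this
    have hih := ih (T.filter (fun t => !(t.1 == p))) (List.nodup_cons.mp hnd).2 hcov'
    exact (List.Perm.append_left _ hih).trans (List.filter_append_perm _ T)

-- the composite lexicographic sort is: sorted distinct prefixes, and inside each
-- prefix the group's triples sorted by key
theorem sorted_lex_eq_flatMap (T : List (String × String × String))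
    (hk : (T.map (fun t => t.2.1)).Nodup) :
    PySem.List.sorted T (fun t => toLex (t.1, t.2.1)) false
      = (PySem.List.sorted (PySem.Set.ofList (T.map (fun t => t.1))) (fun x => x) false).flatMap
          (fun p => PySem.List.sorted (T.filter (fun t => t.1 == p)) (fun t => t.2.1) false) := by
  set ps := PySem.List.sorted (PySem.Set.ofList (T.map (fun t => t.1))) (fun x => x) false with hps
  have hpsperm : ps.Perm (PySem.Set.ofList (T.map (fun t => t.1))) := PySem.List.sorted_perm _ _ _
  have hpsnd : ps.Nodup := (PySem.Set.nodup_ofList _).perm hpsperm.symm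
  have hpslt : ps.Pairwise (fun a b => a < b) := PySem.List.sorted_ofList_pairwise_lt _
  apply PySem.List.sorted_eq_of_perm_of_pairwise_lt
  · -- permutation
    have h1 : (ps.flatMap (fun p => PySem.List.sorted (T.filter (fun t => t.1 == p)) (fun t => t.2.1) false)).Perm
        (ps.flatMap (fun p => T.filter (fun t => t.1 == p))) :=
      List.Perm.flatMap (List.Perm.refl ps) (fun p _ => PySem.List.sorted_perm _ _ _)
    refine h1.trans (perm_flatMap_filter ps T hpsnd ?_)
    intro t ht
    have : t.1 ∈ PySem.Set.ofList (T.map (fun t => t.1)) := by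
      rw [PySem.Set.mem_ofList]
      exact List.mem_map_of_mem ht
    exact hpsperm.mem_iff.mpr this
  · -- pairwise lexicographic strict order
    rw [List.pairwise_flatMap]
    constructor
    · intro p _
      have hsub : ((T.filter (fun t => t.1 == p)).map (fun t => t.2.1)).Nodup :=
        ((List.filter_sublist (l := T)).map _).nodup hk
      have hperm := PySem.List.sorted_perm (T.filter (fun t => t.1 == p)) (fun t => t.2.1) false
      have hndz : ((PySem.List.sorted (T.filter (fun t => t.1 == p)) (fun t => t.2.1) false).map
          (fun t => t.2.1)).Nodup := hsub.perm (hperm.map _).symm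
      have hlt := pairwise_lt_of_sorted_nodup
        (PySem.List.sorted (T.filter (fun t => t.1 == p)) (fun t => t.2.1) false) (fun t => t.2.1)
        (PySem.List.sorted_pairwise (T.filter (fun t => t.1 == p)) (fun t => t.2.1)) hndz
      refine hlt.imp_of_mem ?_
      intro a b ha hb hab
      have ha1 : a.1 = p := by
        have := List.mem_filter.mp (hperm.mem_iff.mp ha)
        simpa using this.2
      have hb1 : b.1 = p := by
        have := List.mem_filter.mp (hperm.mem_iff.mp hb)
        simpa using this.2
      rw [Prod.Lex.lt_iff]
      exact Or.inr ⟨by simp [ha1, hb1], by simpa using hab⟩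
    · refine hpslt.imp_of_mem ?_
      intro p q hp hq hpq x hx y hy
      have hx1 : x.1 = p := by
        have := List.mem_filter.mp ((PySem.List.sorted_perm _ _ _).mem_iff.mp hx)
        simpa using this.2
      have hy1 : y.1 = q := by
        have := List.mem_filter.mp ((PySem.List.sorted_perm _ _ _).mem_iff.mp hy)
        simpa using this.2
      rw [Prod.Lex.lt_iff]
      exact Or.inl (by simpa [hx1, hy1] using hpq)


-- A's flattening double loop appends, group by group, the sorted keys with their values
theorem dict_double_fold_items (K : String → List String) (V : String → String → String) :
    ∀ (ps : List String) (r : PySem.Dict String String),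
    r.keys.Nodup →
    (∀ p ∈ ps, ∀ k ∈ K p, r.contains k = false) →
    ps.Pairwise (fun p q => ∀ k ∈ K p, k ∉ K q) →
    (∀ p ∈ ps, (K p).Nodup) →
    (ps.foldl (fun r p =>
        (PySem.List.sorted (K p) (fun x => x) false).foldl (fun r k => r.insert k (V p k)) r) r).items
      = r.items ++ ps.flatMap
          (fun p => (PySem.List.sorted (K p) (fun x => x) false).map (fun k => (k, V p k))) := by
  intro ps
  induction ps with
  | nil => intro r _ _ _ _; simp
  | cons p rest ih =>
    intro r hr hfresh hdisj hknd
    simp only [List.foldl_cons, List.flatMap_cons]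
    have hperm : (PySem.List.sorted (K p) (fun x => x) false).Perm (K p) :=
      PySem.List.sorted_perm _ _ _
    have hsnd : (PySem.List.sorted (K p) (fun x => x) false).Nodup :=
      (hknd p (by simp)).perm hperm.symm
    have hone := PySem.Dict.items_foldl_insert_fresh
      (PySem.List.sorted (K p) (fun x => x) false) (fun x => x) (V p) r
      (fun k hk => hfresh p (by simp) k (hperm.mem_iff.mp hk))
      (by simpa using hsnd)
    set r' := (PySem.List.sorted (K p) (fun x => x) false).foldl (fun r k => r.insert k (V p k)) r with hr'
    have hone' : r'.items = r.items ++ (PySem.List.sorted (K p) (fun x => x) false).map (fun k => (k, V p k)) := by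
      simpa using hone
    have hnotmem : ∀ (d : PySem.Dict String String) (k : String),
        d.contains k = false → k ∉ d.keys := by
      intro d k h hk
      rw [← PySem.Dict.contains_iff_mem_keys] at hk
      rw [h] at hk
      exact Bool.false_ne_true hk
    have hkeys' : r'.keys = r.keys ++ PySem.List.sorted (K p) (fun x => x) false := by
      show r'.items.map Prod.fst = _
      rw [hone']
      rw [List.map_append, List.map_map]
      simp [Function.comp_def]
      rfl
    have hr'nd : r'.keys.Nodup := by
      rw [hkeys', List.nodup_append]
      refine ⟨hr, hsnd, ?_⟩
      intro k hk b hb he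
      subst he
      exact hnotmem r k (hfresh p (by simp) k (hperm.mem_iff.mp hb)) hk
    have hfresh' : ∀ q ∈ rest, ∀ k ∈ K q, r'.contains k = false := by
      intro q hq k hk
      have h1 : r.contains k = false := hfresh q (by simp [hq]) k hk
      have h2 : k ∉ K p := by
        have := List.pairwise_cons.mp hdisj
        intro hkp
        exact this.1 q hq k hkp hk
      have hnm : k ∉ r'.keys := by
        rw [hkeys']
        intro hmem
        rcases List.mem_append.mp hmem with h | h
        · exact hnotmem r k h1 h
        · exact h2 (hperm.mem_iff.mp h)
      cases hc : r'.contains k with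
      | false => rfl
      | true => exact absurd ((PySem.Dict.contains_iff_mem_keys _ _).mp hc) hnm
    rw [ih r' hr'nd hfresh' (List.pairwise_cons.mp hdisj).2 (fun q hq => hknd q (by simp [hq])),
      hone', List.append_assoc]

-- A's output, rewritten as the projection of the lexicographically sorted triples
theorem A_eq_sorted (d : List (String × String)) (suffixes : List String)
    (hpre : (d.map Prod.fst).Nodup) :
    sort_dict_by_key_prefix d suffixes
      = (PySem.List.sorted (trips d suffixes) (fun t => toLex (t.1, t.2.1)) false).map
          (fun t => t.2) := by
  have hk : ((trips d suffixes).map (fun t => t.2.1)).Nodup :=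
    (trips_keys_sublist d suffixes).nodup hpre
  set T := trips d suffixes with hT
  -- step 1: the grouping loop is the fold over the triples
  have hgroups :
      (d.map Prod.fst).foldl (fun g key =>
        match firstSuffix key suffixes with
        | none => g
        | some s =>
          g.insert (prefixOf key s)
            ((g.getD (prefixOf key s) PySem.Dict.empty).insert key
              ((PySem.Dict.ofList d).getD key ""))) PySem.Dict.empty
      = T.foldl (fun g t => g.insert t.1 ((g.getD t.1 PySem.Dict.empty).insert t.2.1 t.2.2))
          PySem.Dict.empty :=
    groups_foldl_eq suffixes _ d PySem.Dict.empty (ofList_getD_of_nodup d hpre)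
  set G := T.foldl (fun g t => g.insert t.1 ((g.getD t.1 PySem.Dict.empty).insert t.2.1 t.2.2))
    PySem.Dict.empty with hG
  have hkeysG : G.keys = PySem.Set.ofList (T.map (fun t => t.1)) := by
    rw [hG, PySem.Dict.keys_foldl_insert_key T (fun t => t.1) _ PySem.Dict.empty]
    simp [PySem.Dict.keys_empty, PySem.Set.update, PySem.Set.ofList_eq_foldl]
  have hinner : ∀ p, G.getD p PySem.Dict.empty
      = (T.filter (fun t => t.1 == p)).foldl (fun i t => i.insert t.2.1 t.2.2) PySem.Dict.empty := by
    intro p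
    rw [hG, getD_groupfold]
    simp [PySem.Dict.getD_empty]
  have hTpnd : ∀ p, ((T.filter (fun t => t.1 == p)).map (fun t => t.2.1)).Nodup :=
    fun p => ((List.filter_sublist (l := T)).map _).nodup hk
  have hitems : ∀ p, (G.getD p PySem.Dict.empty).items
      = (T.filter (fun t => t.1 == p)).map (fun t => (t.2.1, t.2.2)) := by
    intro p
    rw [hinner p]
    have := PySem.Dict.items_foldl_insert_fresh (T.filter (fun t => t.1 == p))
      (fun t => t.2.1) (fun t => t.2.2) PySem.Dict.empty
      (fun a _ => PySem.Dict.contains_empty _) (hTpnd p)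
    simpa using this
  have hkeysInner : ∀ p, (G.getD p PySem.Dict.empty).keys
      = (T.filter (fun t => t.1 == p)).map (fun t => t.2.1) := by
    intro p
    show (G.getD p PySem.Dict.empty).items.map Prod.fst = _
    rw [hitems p, List.map_map]
    rfl
  -- the flattening double loop
  show (let src := PySem.Dict.ofList d; _) = _
  simp only [sort_dict_by_key_prefix]
  rw [hgroups]
  have hps : PySem.List.sorted G.keys (fun x => x) false
      = PySem.List.sorted (PySem.Set.ofList (T.map (fun t => t.1))) (fun x => x) false := by
    rw [hkeysG]
  rw [hps]
  set ps := PySem.List.sorted (PySem.Set.ofList (T.map (fun t => t.1))) (fun x => x) false with hpsdef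
  have hpslt : ps.Pairwise (fun a b => a < b) := PySem.List.sorted_ofList_pairwise_lt _
  have hdouble := dict_double_fold_items (fun p => (G.getD p PySem.Dict.empty).keys)
    (fun p k => (G.getD p PySem.Dict.empty).getD k "") ps PySem.Dict.empty
    (by simp [PySem.Dict.keys_empty])
    (fun p _ k _ => PySem.Dict.contains_empty _)
    (by
      refine hpslt.imp_of_mem ?_
      intro p q _ _ hpq k hkp hkq
      have hkp : k ∈ (T.filter (fun t => t.1 == p)).map (fun t => t.2.1) := by
        rw [← hkeysInner p]; exact hkp
      have hkq : k ∈ (T.filter (fun t => t.1 == q)).map (fun t => t.2.1) := by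
        rw [← hkeysInner q]; exact hkq
      rcases List.mem_map.mp hkp with ⟨t, htm, hteq⟩
      rcases List.mem_map.mp hkq with ⟨s, hsm, hseq⟩
      rcases List.mem_filter.mp htm with ⟨htT, htp⟩
      rcases List.mem_filter.mp hsm with ⟨hsT, hsq⟩
      have : t = s := List.inj_on_of_nodup_map hk htT hsT (by rw [hteq, hseq])
      have hpq' : p = q := by
        have h1 : t.1 = p := by simpa using htp
        have h2 : s.1 = q := by simpa using hsq
        rw [← h1, ← h2, this]
      exact absurd hpq' (ne_of_lt hpq))
    (fun p _ => by show ((G.getD p PySem.Dict.empty).keys).Nodup; rw [hkeysInner p]; exact hTpnd p)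
  rw [hdouble]
  have hflat : ps.flatMap (fun p =>
        (PySem.List.sorted ((G.getD p PySem.Dict.empty).keys) (fun x => x) false).map
          (fun k => (k, (G.getD p PySem.Dict.empty).getD k "")))
      = ps.flatMap (fun p =>
        (PySem.List.sorted (T.filter (fun t => t.1 == p)) (fun t => t.2.1) false).map
          (fun t => t.2)) := by
    apply List.flatMap_congr
    intro p _
    rw [hkeysInner p]
    apply sorted_keys_pairs _ _ (hTpnd p)
    intro t ht
    apply PySem.Dict.getD_of_mem_items
    · rw [hitems p]
      exact List.mem_map_of_mem ht
    · show (G.getD p PySem.Dict.empty).items.map Prod.fst |>.Nodup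
      rw [hitems p, List.map_map]
      exact hTpnd p
  rw [hflat, sorted_lex_eq_flatMap T hk, List.map_flatMap]
  simp only [show (PySem.Dict.empty : PySem.Dict String String).items = [] from rfl,
    List.nil_append]
  rw [← hpsdef]

-- B's output, rewritten the same way
theorem B_eq_sorted (d : List (String × String)) (suffixes : List String)
    (hpre : (d.map Prod.fst).Nodup) :
    sort_dict_by_key_prefix_alt d suffixes
      = (PySem.List.sorted (trips d suffixes) (fun t => toLex (t.1, t.2.1)) false).map
          (fun t => t.2) := by
  have hk : ((trips d suffixes).map (fun t => t.2.1)).Nodup :=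
    (trips_keys_sublist d suffixes).nodup hpre
  simp only [sort_dict_by_key_prefix_alt]
  rw [foldl_trips suffixes d [], List.nil_append, sorted2_eq_sorted_lex]
  set S := PySem.List.sorted (trips d suffixes) (fun t => toLex (t.1, t.2.1)) false with hS
  have hnd : (S.map (fun t => t.2.1)).Nodup :=
    hk.perm ((PySem.List.sorted_perm _ _ _).map _).symm
  have := PySem.Dict.items_foldl_insert_fresh S (fun t => t.2.1) (fun t => t.2.2)
    PySem.Dict.empty (fun a _ => PySem.Dict.contains_empty _) hnd
  rw [this]
  simp [show (PySem.Dict.empty : PySem.Dict String String).items = [] from rfl]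

-- ===== VERDICT =====
theorem sort_dict_by_key_prefix_spec : Claim_equal_sort_dict_by_key_prefix := by
  intro d suffixes _ hpre
  unfold Spec_sort_dict_by_key_prefix
  rw [A_eq_sorted d suffixes hpre, B_eq_sorted d suffixes hpre]
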